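-- pv_equiv track=rewrite | github.com/MarioRodrigues10/LA2 | aloca.py | aloca
-- ===== SOURCE A (Python) =====
-- import collections
--
-- def aloca(prefs):
--     sort_dictionary = collections.OrderedDict(sorted(prefs.items()))
--     for num in sort_dictionary.copy():
--         if sort_dictionary[num]:
--             temp = int(sort_dictionary[num][0])
--             sort_dictionary.update({num: sort_dictionary[num][0]})
--             sort_dictionary.pop(num)
--             for null in sort_dictionary.copy():
--                 if temp in sort_dictionary[null]:
--                     sort_dictionary[null].remove(temp)
--     if not sort_dictionary:
--         return []
--     else:
--         return list(sort_dictionary)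
-- ===== SOURCE B (Python) =====
-- import collections
--
-- def aloca(prefs):
--     # One pass over the sorted items with a Counter of claimed values:
--     # an element of a list "survives" iff its occurrence index is at least
--     # the number of times that value has been claimed so far, which is
--     # exactly what A's repeated list.remove() scans compute.
--     claims = collections.Counter()
--     leftover = []
--     for key, lst in sorted(prefs.items()):
--         seen = collections.Counter()
--         chosen = None
--         for v in lst:
--             if seen[v] >= claims[v]:
--                 chosen = v
--                 break
--             seen[v] += 1
--         if chosen is None:
--             leftover.append(key)
--         else:
--             claims[chosen] += 1
--     return leftover
-- ===== Notes on version B (the rewrite author's own statement) =====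
-- stated objective: faster
-- what changed: A repeatedly rescans every remaining dict entry and calls list.remove after each allocation; B makes a single pass over the sorted items keeping a Counter of claimed values and finds each key's first surviving preference by an occurrence-count scan, so the per-allocation pass over all other keys disappears.
import Mathlib
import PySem

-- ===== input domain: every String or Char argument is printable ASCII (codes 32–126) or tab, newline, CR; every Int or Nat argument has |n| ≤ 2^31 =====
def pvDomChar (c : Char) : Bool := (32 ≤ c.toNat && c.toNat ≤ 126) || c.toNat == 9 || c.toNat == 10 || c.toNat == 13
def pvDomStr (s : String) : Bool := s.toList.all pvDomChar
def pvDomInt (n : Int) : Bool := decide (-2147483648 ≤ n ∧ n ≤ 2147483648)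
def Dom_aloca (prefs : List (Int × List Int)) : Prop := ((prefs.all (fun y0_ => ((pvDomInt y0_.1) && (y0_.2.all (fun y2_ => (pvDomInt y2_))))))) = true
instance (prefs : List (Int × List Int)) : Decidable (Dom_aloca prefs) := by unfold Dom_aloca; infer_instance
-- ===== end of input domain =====

-- B replaces A's repeated remove-passes over the whole dict by a single pass with a counter of
-- claimed values (objective: faster). Return-value equivalence only: A mutates the lists stored
-- in `prefs` in place (list.remove), B does not.

-- ===== PORT A =====
-- inner loop: `for null in sort_dictionary.copy(): if temp in sort_dictionary[null]: sort_dictionary[null].remove(temp)`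
-- (`if v in xs: xs.remove(v)` is a match on PySem.List.remove? xs v: some = removed, none = skip)
def alocaInner (temp : Int) (d : PySem.Dict Int (List Int)) : PySem.Dict Int (List Int) :=
  d.keys.foldl (fun d' nul =>
    match d'.get? nul with
    | some l =>
      match PySem.List.remove? l temp with
      | some l' => d'.insert nul l'
      | none => d'
    | none => d') d

def aloca (prefs : List (Int × List Int)) : List Int :=
  -- `collections.OrderedDict(sorted(prefs.items()))`: prefs is a Python dict, so its keys are
  -- distinct (Pre_) and the tuple sort is a sort by key (the list components are never compared)
  let sortd := PySem.Dict.ofList (PySem.List.sorted prefs (fun p => p.1) false)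
  -- `for num in sort_dictionary.copy(): …` over the initial key snapshot
  let final := sortd.keys.foldl (fun d num =>
    match d.get? num with
    | some l =>
      match l with
      | [] => d          -- `if sort_dictionary[num]:` is false
      | t :: _ =>
        -- temp = int(l[0]) = l[0] (the values are ints);
        -- `update({num: l[0]})` overwrites in place and is immediately followed by `pop(num)`:
        -- the net effect of the pair on the dict is erasing the key
        alocaInner t (d.erase num)
    | none => d) sortd
  if final.size = 0 then [] else final.keys   -- `if not sort_dictionary: return [] else: return list(…)`

-- ===== PORT B =====
-- inner `for v in lst: if seen[v] >= claims[v]: chosen = v; break; seen[v] += 1` (Counter: missing = 0)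
def firstSurvivor (claims : PySem.Dict Int Int) (seen : PySem.Dict Int Int) : List Int → Option Int
  | [] => none
  | v :: rest =>
      if claims.getD v 0 ≤ seen.getD v 0 then some v
      else firstSurvivor claims (seen.modify v 0 (· + 1)) rest

def aloca_alt (prefs : List (Int × List Int)) : List Int :=
  let st := (PySem.List.sorted prefs (fun p => p.1) false).foldl
    (fun (st : PySem.Dict Int Int × List Int) kv =>
      match firstSurvivor st.1 PySem.Dict.empty kv.2 with
      | none => (st.1, st.2 ++ [kv.1])
      | some v => (st.1.modify v 0 (· + 1), st.2))
    (PySem.Dict.empty, ([] : List Int))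
  st.2

-- ===== PRECONDITION & SPEC =====
-- prefs stands for a Python dict, whose keys are necessarily distinct; association lists with
-- duplicate keys do not arise from any dict input, so Pre_ excludes nothing A's caller can pass.
def Pre_aloca (prefs : List (Int × List Int)) : Prop :=
  prefs.Pairwise (fun a b => a.1 ≠ b.1)
instance (prefs : List (Int × List Int)) : Decidable (Pre_aloca prefs) := by unfold Pre_aloca; infer_instance

def pvWitness_aloca : (List (Int × List Int)) := [(2, [7, 7]), (1, [7]), (3, []), (4, [7, 5])]

def Spec_aloca (prefs : List (Int × List Int)) (out : List Int) : Prop := out = aloca_alt prefs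
instance (prefs : List (Int × List Int)) (out : List Int) : Decidable (Spec_aloca prefs out) := by unfold Spec_aloca; infer_instance

-- ===== CLAIM (what is proved, stated in full; the proofs are below) =====
def Claim_equal_aloca : Prop := ∀ (prefs : List (Int × List Int)), Dom_aloca prefs → Pre_aloca prefs → Spec_aloca prefs (aloca prefs)

-- ===== LEMMAS AND PROOFS =====

-- `if v in xs: xs.remove(v)` removes the first occurrence: bridge remove? to List.erase
theorem remove?_of_mem (l : List Int) (v : Int) (h : v ∈ l) :
    PySem.List.remove? l v = some (l.erase v) := by
  induction l with
  | nil => simp at h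
  | cons w t ih =>
    by_cases hwv : w = v
    · subst hwv
      simp [PySem.List.remove?, List.idxOf?_cons]
    · rcases List.mem_cons.mp h with h1 | h2
      · exact absurd h1.symm hwv
      · have := ih h2
        simp [PySem.List.remove?, List.idxOf?_cons, hwv] at this ⊢
        obtain ⟨a, ha, he⟩ := this
        exact ⟨a, ha, he⟩

theorem remove?_of_not_mem (l : List Int) (v : Int) (h : ¬ v ∈ l) :
    PySem.List.remove? l v = none := by
  simp [PySem.List.remove?]
  exact Not.imp h fun a => a

-- claim counts as a plain function; `bumpC` records one claim of v, `decC` uses one up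
def bumpC (c : Int → Int) (v : Int) : Int → Int := fun w => if w = v then c v + 1 else c w
def decC (c : Int → Int) (v : Int) : Int → Int := fun w => if w = v then c v - 1 else c w

-- the residual of a preference list: drop the first (c v) occurrences of each value v
def residF (c : Int → Int) : List Int → List Int
  | [] => []
  | v :: t => if c v ≤ 0 then v :: residF c t else residF (decC c v) t

-- the functional core both ports compute: keys kept in sorted order, a claim per first survivor
def runSpec (c : Int → Int) : List (Int × List Int) → List Int
  | [] => []
  | (k, L) :: rest =>
    match (residF c L).head? with
    | none => k :: runSpec c rest
    | some v => runSpec (bumpC c v) rest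

theorem residF_congr {c c' : Int → Int} (h : c = c') (L : List Int) :
    residF c L = residF c' L := by rw [h]

theorem runSpec_congr {c c' : Int → Int} (h : c = c') (l : List (Int × List Int)) :
    runSpec c l = runSpec c' l := by rw [h]

theorem residF_zero (L : List Int) : residF (fun _ => 0) L = L := by
  induction L with
  | nil => rfl
  | cons v t ih => simp [residF, ih]

theorem decC_bumpC_self (c : Int → Int) (v : Int) : decC (bumpC c v) v = c := by
  funext w; simp [decC, bumpC]; split_ifs with h <;> simp [h]

theorem bumpC_decC_self (c : Int → Int) (v : Int) : bumpC (decC c v) v = c := by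
  funext w; simp [decC, bumpC]; split_ifs with h <;> simp [h]

theorem decC_bumpC_comm (c : Int → Int) (v w : Int) (h : w ≠ v) :
    decC (bumpC c v) w = bumpC (decC c w) v := by
  funext x; simp [decC, bumpC, h, h.symm]; split_ifs with h1 h2 <;> simp_all

theorem decC_nonneg (c : Int → Int) (hc : ∀ w, 0 ≤ c w) (w : Int) (h0 : ¬ c w ≤ 0) :
    ∀ x, 0 ≤ decC c w x := by
  intro x; simp [decC]; split_ifs with h <;> [omega; exact hc x]

theorem bumpC_nonneg (c : Int → Int) (hc : ∀ w, 0 ≤ c w) (v : Int) : ∀ w, 0 ≤ bumpC c v w := by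
  intro w
  simp only [bumpC]
  split_ifs with h
  · linarith [hc v]
  · exact hc w

-- removing the first occurrence of v from the residual uses up one claim of v
theorem erase_residF (c : Int → Int) (hc : ∀ w, 0 ≤ c w) (v : Int) (L : List Int) :
    (residF c L).erase v = residF (bumpC c v) L := by
  induction L generalizing c with
  | nil => rfl
  | cons w t ih =>
    by_cases hwv : w = v
    · subst hwv
      by_cases h0 : c w ≤ 0
      · have hcw : c w = 0 := le_antisymm h0 (hc w)
        have h1 : ¬ (bumpC c w w ≤ 0) := by simp [bumpC, hcw]
        rw [residF, if_pos h0, residF, if_neg h1, List.erase_cons_head,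
          residF_congr (decC_bumpC_self c w) t]
      · have h1 : ¬ (bumpC c w w ≤ 0) := by simp [bumpC]; omega
        rw [residF, if_neg h0, residF, if_neg h1, ih _ (decC_nonneg c hc w h0),
          residF_congr (bumpC_decC_self c w) t, residF_congr (decC_bumpC_self c w) t]
    · have hb : bumpC c v w = c w := by simp [bumpC, hwv]
      by_cases h0 : c w ≤ 0
      · rw [residF, if_pos h0, residF, hb, if_pos h0,
          List.erase_cons_tail (by simp [hwv]), ih c hc]
      · rw [residF, if_neg h0, residF, hb, if_neg h0, ih _ (decC_nonneg c hc w h0),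
          residF_congr (decC_bumpC_comm c v w hwv) t]

-- ===== B side: the fold over sorted items computes runSpec =====

theorem head?_residF_firstSurvivor (cd sd : PySem.Dict Int Int) (L : List Int) :
    firstSurvivor cd sd L = (residF (fun w => cd.getD w 0 - sd.getD w 0) L).head? := by
  induction L generalizing sd with
  | nil => rfl
  | cons v t ih =>
    rw [firstSurvivor, residF]
    by_cases h : cd.getD v 0 ≤ sd.getD v 0
    · rw [if_pos h, if_pos (by omega), List.head?_cons]
    · rw [if_neg h, if_neg (by omega), ih]
      congr 1
      apply residF_congr
      funext w
      simp [decC, PySem.Dict.getD_modify]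
      split_ifs with h1 <;> simp_all <;> omega

theorem bfold_runSpec (s : List (Int × List Int)) (cd : PySem.Dict Int Int) (acc : List Int) :
    (s.foldl (fun (st : PySem.Dict Int Int × List Int) kv =>
      match firstSurvivor st.1 PySem.Dict.empty kv.2 with
      | none => (st.1, st.2 ++ [kv.1])
      | some v => (st.1.modify v 0 (· + 1), st.2)) (cd, acc)).2
    = acc ++ runSpec (fun w => cd.getD w 0) s := by
  induction s generalizing cd acc with
  | nil => simp [runSpec]
  | cons kv rest ih =>
    obtain ⟨k, L⟩ := kv
    have hfs : firstSurvivor cd PySem.Dict.empty L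
        = (residF (fun w => cd.getD w 0) L).head? := by
      rw [head?_residF_firstSurvivor]
      congr 1
      apply residF_congr
      funext w
      simp [PySem.Dict.getD_empty]
    rw [List.foldl_cons]
    cases hh : firstSurvivor cd PySem.Dict.empty L with
    | none =>
      simp only [runSpec, ← hfs, hh, ih]
      simp
    | some v =>
      simp only [runSpec, ← hfs, hh, ih]
      have : (fun w => (cd.modify v 0 (· + 1)).getD w 0)
           = bumpC (fun w => cd.getD w 0) v := by
        funext w
        simp [bumpC, PySem.Dict.getD_modify]
      rw [this]

theorem aloca_alt_eq_runSpec (prefs : List (Int × List Int)) :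
    aloca_alt prefs = runSpec (fun _ => 0) (PySem.List.sorted prefs (fun p => p.1) false) := by
  show ((PySem.List.sorted prefs (fun p => p.1) false).foldl _ (PySem.Dict.empty, ([] : List Int))).2 = _
  rw [bfold_runSpec]
  rw [List.nil_append]
  exact runSpec_congr (funext fun w => by simp [PySem.Dict.getD_empty]) _

-- ===== A side: the dict-mutating loops compute runSpec =====

-- one pass of the inner loop body on one key of a distinct-keyed dict
theorem innerStep_items (temp : Int) (d : PySem.Dict Int (List Int)) (hnd : d.keys.Nodup)
    (nul : Int) (h : nul ∈ d.keys) :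
    (match d.get? nul with
     | some l =>
       match PySem.List.remove? l temp with
       | some l' => d.insert nul l'
       | none => d
     | none => d).items
    = d.items.map (fun p => if p.1 = nul then (p.1, p.2.erase temp) else p) := by
  obtain ⟨l, hl⟩ : ∃ l, d.get? nul = some l := by
    rcases ho : d.get? nul with _ | l
    · exact absurd ((PySem.Dict.get?_eq_none_iff_not_mem_keys d nul).mp ho) (by simp [h])
    · exact ⟨l, rfl⟩
  have key : ∀ p ∈ d.items, p.1 = nul → p.2 = l := by
    intro p hp hpk
    have := PySem.Dict.get?_of_mem_items d hp hnd
    rw [hpk, hl] at this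
    exact (Option.some_inj.mp this).symm
  rw [hl]
  show (match PySem.List.remove? l temp with
        | some l' => d.insert nul l'
        | none => d).items
      = d.items.map (fun p => if p.1 = nul then (p.1, p.2.erase temp) else p)
  by_cases hc : temp ∈ l
  · rw [remove?_of_mem l temp hc]
    have hcont : d.contains nul = true := (PySem.Dict.contains_iff_mem_keys d nul).mpr h
    rw [PySem.Dict.items_insert_of_contains d _ hcont]
    apply List.map_congr_left
    intro p hp
    by_cases hpk : p.1 = nul
    · simp [hpk, key p hp hpk]
    · simp [hpk]
  · rw [remove?_of_not_mem l temp hc]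
    conv_lhs => rw [← List.map_id d.items]
    apply List.map_congr_left
    intro p hp
    by_cases hpk : p.1 = nul
    · have hk := key p hp hpk
      simp [hpk, hk, List.erase_of_not_mem hc, Prod.ext_iff]
    · simp [hpk]

-- the whole inner loop erases the first occurrence of temp from every stored list
theorem innerFold_items (temp : Int) (ks : List Int) :
    ∀ d : PySem.Dict Int (List Int), ks.Nodup → (∀ k ∈ ks, k ∈ d.keys) → d.keys.Nodup →
    (ks.foldl (fun d' nul =>
      match d'.get? nul with
      | some l =>
        match PySem.List.remove? l temp with
        | some l' => d'.insert nul l'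
        | none => d'
      | none => d') d).items
    = d.items.map (fun p => if p.1 ∈ ks then (p.1, p.2.erase temp) else p) := by
  induction ks with
  | nil => intro d _ _ _; simp
  | cons k ks ih =>
    intro d hnodup hsub hnd
    rw [List.foldl_cons]
    have hstep := innerStep_items temp d hnd k (hsub k (List.mem_cons_self))
    have hkeys : (match d.get? k with
      | some l =>
        match PySem.List.remove? l temp with
        | some l' => d.insert k l'
        | none => d
      | none => d).keys = d.keys := by
      show (PySem.Dict.items _).map Prod.fst = _
      rw [hstep, List.map_map]
      apply List.map_congr_left
      intro p _
      by_cases hpk : p.1 = k <;> simp [hpk]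
    rw [ih _ (List.Nodup.of_cons hnodup)
        (by intro x hx; rw [hkeys]; exact hsub x (List.mem_cons_of_mem _ hx))
        (by rw [hkeys]; exact hnd),
      hstep, List.map_map]
    apply List.map_congr_left
    intro p _
    have hknotks : k ∉ ks := (List.nodup_cons.mp hnodup).1
    by_cases hpk : p.1 = k
    · simp [hpk, hknotks]
    · by_cases hpks : p.1 ∈ ks <;> simp [hpk, hpks]

theorem alocaInner_items (temp : Int) (d : PySem.Dict Int (List Int)) (hnd : d.keys.Nodup) :
    (alocaInner temp d).items = d.items.map (fun p => (p.1, p.2.erase temp)) := by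
  rw [alocaInner, innerFold_items temp d.keys d hnd (fun k hk => hk) hnd]
  apply List.map_congr_left
  intro p hp
  simp [PySem.Dict.mem_keys_of_mem_items d hp]

-- invariant of the outer loop: processed-and-kept keys hold [], unprocessed keys hold residuals
theorem mainA (rest : List (Int × List Int)) :
    ∀ (kept : List Int) (c : Int → Int), (∀ w, 0 ≤ c w) →
    (kept ++ rest.map (·.1)).Nodup →
    ((rest.map (·.1)).foldl (fun d num =>
        match d.get? num with
        | some l =>
          match l with
          | [] => d
          | t :: _ => alocaInner t (d.erase num)
        | none => d)
      (PySem.Dict.mk (kept.map (fun k => (k, ([] : List Int)))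
        ++ rest.map (fun p => (p.1, residF c p.2))))).items
    = (kept ++ runSpec c rest).map (fun k => (k, ([] : List Int))) := by
  induction rest with
  | nil => intro kept c _ _; simp [runSpec]
  | cons q rest ih =>
    intro kept c hc hnodup
    obtain ⟨k, L⟩ := q
    simp only [List.map_cons] at hnodup
    set d := PySem.Dict.mk (kept.map (fun k => (k, ([] : List Int)))
        ++ ((k, L) :: rest).map (fun p => (p.1, residF c p.2))) with hd
    have hitems : d.items = kept.map (fun k => (k, ([] : List Int)))
        ++ (k, residF c L) :: rest.map (fun p => (p.1, residF c p.2)) := by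
      simp [hd]
    have hkeys : d.keys = kept ++ k :: rest.map (·.1) := by
      show d.items.map Prod.fst = _
      rw [hitems]; simp [Function.comp_def]
    have hndk : d.keys.Nodup := by rw [hkeys]; simpa using hnodup
    have hget : d.get? k = some (residF c L) := by
      apply PySem.Dict.get?_of_mem_items d _ hndk
      rw [hitems]; exact List.mem_append_right _ (List.mem_cons_self)
    rw [List.map_cons, List.foldl_cons, hget]
    have hkkept : k ∉ kept := fun hk =>
      (List.nodup_append.mp hnodup).2.2 k hk k (by simp) rfl
    have hkrest : k ∉ rest.map (·.1) :=
      (List.nodup_cons.mp (List.nodup_append.mp hnodup).2.1).1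
    have hnodup' : (kept ++ rest.map (·.1)).Nodup :=
      List.Nodup.sublist
        (List.Sublist.append_left (List.sublist_cons_self k (rest.map (·.1))) kept) hnodup
    cases hres : residF c L with
    | nil =>
      show ((rest.map (·.1)).foldl _ d).items = _
      have : d = PySem.Dict.mk ((kept ++ [k]).map (fun k => (k, ([] : List Int)))
          ++ rest.map (fun p => (p.1, residF c p.2))) := by
        apply PySem.Dict.ext
        rw [hitems, hres]; simp
      rw [this, ih (kept ++ [k]) c hc (by simpa using hnodup)]
      rw [runSpec, hres]
      simp
    | cons t tl =>
      show ((rest.map (·.1)).foldl _ (alocaInner t (d.erase k))).items = _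
      have herase : (d.erase k).items = kept.map (fun k => (k, ([] : List Int)))
          ++ rest.map (fun p => (p.1, residF c p.2)) := by
        show d.items.filter _ = _
        rw [hitems, List.filter_append]
        congr 1
        · apply List.filter_eq_self.mpr
          intro p hp
          obtain ⟨x, hx, rfl⟩ := List.mem_map.mp hp
          simp only [Bool.not_eq_eq_eq_not, Bool.not_true, beq_eq_false_iff_ne, ne_eq]
          exact fun h => hkkept (h ▸ hx)
        · have hhead : (!(k == k)) = false := by simp
          rw [List.filter_cons, hhead]
          simp only [Bool.false_eq_true, if_false]
          apply List.filter_eq_self.mpr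
          intro p hp
          obtain ⟨a, ha, rfl⟩ := List.mem_map.mp hp
          simp only [Bool.not_eq_eq_eq_not, Bool.not_true, beq_eq_false_iff_ne, ne_eq]
          exact fun h => hkrest (h ▸ List.mem_map_of_mem ha)
      have hek : (d.erase k).keys.Nodup := by
        show ((d.erase k).items.map Prod.fst).Nodup
        rw [herase]
        simpa [Function.comp_def] using hnodup'
      have hai : alocaInner t (d.erase k)
          = PySem.Dict.mk (kept.map (fun k => (k, ([] : List Int)))
            ++ rest.map (fun p => (p.1, residF (bumpC c t) p.2))) := by
        apply PySem.Dict.ext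
        rw [alocaInner_items _ _ hek, herase]
        show _ = kept.map (fun k => (k, ([] : List Int)))
            ++ rest.map (fun p => (p.1, residF (bumpC c t) p.2))
        rw [List.map_append, List.map_map, List.map_map]
        refine congrArg₂ (· ++ ·) ?_ ?_
        · apply List.map_congr_left
          intro x _
          simp
        · apply List.map_congr_left
          intro p _
          exact congrArg (Prod.mk p.1) (erase_residF c hc t p.2)
      rw [hai, ih kept (bumpC c t) (bumpC_nonneg c hc t) hnodup', runSpec, hres]
      simp

theorem aloca_eq_runSpec (prefs : List (Int × List Int))
    (hpre : prefs.Pairwise (fun a b => a.1 ≠ b.1)) :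
    aloca prefs = runSpec (fun _ => 0) (PySem.List.sorted prefs (fun p => p.1) false) := by
  set s := PySem.List.sorted prefs (fun p => p.1) false with hs
  have hnd : (s.map (·.1)).Nodup := by
    have h1 : (prefs.map (·.1)).Nodup := by
      rw [List.Nodup, List.pairwise_map]
      exact hpre
    exact (h1.perm ((PySem.List.sorted_perm prefs (fun p => p.1) false).map (·.1)).symm)
  have hd0 : PySem.Dict.ofList s
      = PySem.Dict.mk (([] : List Int).map (fun k => (k, ([] : List Int)))
          ++ s.map (fun p => (p.1, residF (fun _ => 0) p.2))) := by
    apply PySem.Dict.ext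
    show (s.foldl (fun d a => d.insert a.1 a.2) PySem.Dict.empty).items = _
    rw [PySem.Dict.items_foldl_insert_fresh s (·.1) (·.2) PySem.Dict.empty
      (fun a _ => PySem.Dict.contains_empty a.1) hnd]
    simp only [List.map_nil, List.nil_append]
    apply List.map_congr_left
    intro p _
    rw [residF_zero]
  have hkeys0 : (PySem.Dict.ofList s).keys = s.map (·.1) := by
    show (PySem.Dict.ofList s).items.map Prod.fst = _
    rw [hd0]
    simp
  show (if _ then _ else _) = _
  rw [hkeys0]
  have hmain := mainA s [] (fun _ => 0) (fun _ => le_refl 0) (by simpa using hnd)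
  rw [hd0] at hkeys0 ⊢
  split_ifs with hsz
  · simp only [PySem.Dict.size] at hsz
    rw [hmain] at hsz
    simp only [List.nil_append, List.length_map] at hsz
    rw [List.length_eq_zero_iff] at hsz
    rw [hsz]
  · simp only [PySem.Dict.keys]
    rw [hmain]
    simp [Function.comp_def]

-- ===== VERDICT (by name: the statement is the Claim_ definition above) =====
theorem aloca_spec : Claim_equal_aloca := by
  intro prefs _ hpre
  unfold Spec_aloca
  rw [aloca_eq_runSpec prefs hpre, aloca_alt_eq_runSpec prefs]
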